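-- pv_equiv track=rewrite | github.com/runstr/AoC22 | y2024/Day14/day14_2.py | check_points
-- ===== SOURCE A (Python) =====
-- def check_points(points):
--     visted = set()
--     directions = [(-1,0), (1,0), (0,-1), (0,1)]
--
--     for point in points:
--         if point in visted:
--             continue
--         total_flood = 1
--         new_points = [point]
--         while new_points:
--             point = new_points.pop(0)
--             if point in visted:
--                 continue
--             total_flood+=1
--             if total_flood > 20:
--                 return True
--             visted.add(point)
--             for dirx, diry in directions:
--                 next_point = (point[0]+dirx, point[1]+diry)
--                 if next_point in points:
--                     new_points.append(next_point)
--     return False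
-- ===== SOURCE B (Python) =====
-- def check_points(points):
--     # Same result, but O(1) set membership instead of scanning the list,
--     # and an index-pointer queue instead of list.pop(0).
--     grid = frozenset(points)
--     seen = set()
--     for start in points:
--         if start in seen:
--             continue
--         queue = [start]
--         head = 0
--         size = 0
--         while head < len(queue):
--             p = queue[head]
--             head += 1
--             if p in seen:
--                 continue
--             seen.add(p)
--             size += 1
--             if size >= 20:
--                 return True
--             x, y = p
--             for q in ((x - 1, y), (x + 1, y), (x, y - 1), (x, y + 1)):
--                 if q in grid:
--                     queue.append(q)
--     return False
-- ===== Notes on version B (the rewrite author's own statement) =====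
-- stated objective: faster
-- what changed: The per-neighbour linear scan of the points list is replaced by one frozenset built up front, and the O(n) list.pop(0) queue by an index-pointer queue, turning the quadratic flood fill into a linear one.
import Mathlib
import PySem

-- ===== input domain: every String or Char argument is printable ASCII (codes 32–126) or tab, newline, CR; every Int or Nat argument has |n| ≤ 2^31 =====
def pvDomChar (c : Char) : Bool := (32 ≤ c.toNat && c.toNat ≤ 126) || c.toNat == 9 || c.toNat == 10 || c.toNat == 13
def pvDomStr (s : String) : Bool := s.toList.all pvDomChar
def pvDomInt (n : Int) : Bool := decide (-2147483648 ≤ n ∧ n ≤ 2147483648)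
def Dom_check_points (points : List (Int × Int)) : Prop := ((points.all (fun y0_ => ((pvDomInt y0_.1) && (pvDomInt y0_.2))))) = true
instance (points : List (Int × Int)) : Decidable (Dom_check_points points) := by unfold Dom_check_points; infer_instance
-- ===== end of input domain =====

-- B replaces A's per-neighbour linear scan of the points list with a set built once,
-- and A's list.pop(0) queue with an index-pointer queue (same flood-fill result, faster).


-- ===== PORT A =====
-- directions = [(-1,0), (1,0), (0,-1), (0,1)]
def cpDirs : List (Int × Int) := [(-1, 0), (1, 0), (0, -1), (0, 1)]

-- the inner `while new_points:` loop; `none` = `return True`.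
-- fuel only makes the recursion total: 4*|points|+2 pops always suffice
-- (each of the ≤ |points| distinct visits enqueues ≤ 4 neighbours, plus the seed).
def cpLoopA (points : List (Int × Int)) (fuel : Nat)
    (visted : PySem.Set (Int × Int)) (new_points : List (Int × Int)) (total_flood : Int) :
    Option (PySem.Set (Int × Int)) :=
  match fuel with
  | 0 => some visted
  | f + 1 =>
    match new_points with
    | [] => some visted
    | point :: rest =>
      if PySem.Set.contains visted point then
        cpLoopA points f visted rest total_flood
      else
        let total_flood' := total_flood + 1
        if total_flood' > 20 then none
        else
          let nbrs := (cpDirs.map (fun d => (point.1 + d.1, point.2 + d.2))).filter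
            (fun q => points.contains q)
          cpLoopA points f (PySem.Set.add visted point) (rest ++ nbrs) total_flood'

-- the outer `for point in points:` loop
def cpOuterA (points : List (Int × Int)) (rem : List (Int × Int))
    (visted : PySem.Set (Int × Int)) : Bool :=
  match rem with
  | [] => false
  | point :: ps =>
    if PySem.Set.contains visted point then cpOuterA points ps visted
    else
      match cpLoopA points (4 * points.length + 2) visted [point] 1 with
      | none => true
      | some v => cpOuterA points ps v

def check_points (points : List (Int × Int)) : Bool :=
  cpOuterA points points PySem.Set.empty

-- ===== PORT B =====
-- inner `while head < len(queue):` loop; `none` = `return True`; same fuel guard as A's port.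
def cpLoopB (grid : PySem.Set (Int × Int)) (fuel : Nat)
    (seen : PySem.Set (Int × Int)) (queue : List (Int × Int)) (head : Nat) (size : Int) :
    Option (PySem.Set (Int × Int)) :=
  match fuel with
  | 0 => some seen
  | f + 1 =>
    if h : head < queue.length then
      let p := queue[head]
      if PySem.Set.contains seen p then cpLoopB grid f seen queue (head + 1) size
      else
        let seen' := PySem.Set.add seen p
        let size' := size + 1
        if size' ≥ 20 then none
        else
          let nbrs := [(p.1 - 1, p.2), (p.1 + 1, p.2), (p.1, p.2 - 1), (p.1, p.2 + 1)].filter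
            (fun q => PySem.Set.contains grid q)
          cpLoopB grid f seen' (queue ++ nbrs) (head + 1) size'
    else some seen

-- outer `for start in points:` loop
def cpOuterB (points : List (Int × Int)) (grid : PySem.Set (Int × Int))
    (rem : List (Int × Int)) (seen : PySem.Set (Int × Int)) : Bool :=
  match rem with
  | [] => false
  | start :: ps =>
    if PySem.Set.contains seen start then cpOuterB points grid ps seen
    else
      match cpLoopB grid (4 * points.length + 2) seen [start] 0 0 with
      | none => true
      | some s => cpOuterB points grid ps s

def check_points_alt (points : List (Int × Int)) : Bool :=
  cpOuterB points (PySem.Set.ofList points) points PySem.Set.empty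

-- ===== PRECONDITION & SPEC =====
def Spec_check_points (points : List (Int × Int)) (out : Bool) : Prop := out = check_points_alt points
instance (points : List (Int × Int)) (out : Bool) : Decidable (Spec_check_points points out) := by unfold Spec_check_points; infer_instance

-- ===== CLAIM (what is proved, stated in full; the proofs are below) =====
def Claim_equal_check_points : Prop := ∀ (points : List (Int × Int)), Dom_check_points points → Spec_check_points points (check_points points)

-- ===== LEMMAS AND PROOFS =====

-- membership in the frozenset built by B = membership in the list A scans
lemma contains_ofList_eq (points : List (Int × Int)) (q : Int × Int) :
    PySem.Set.contains (PySem.Set.ofList points) q = points.contains q := by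
  rw [Bool.eq_iff_iff]
  simp [PySem.Set.mem_ofList]

-- the two neighbour lists coincide
lemma nbrs_eq (points : List (Int × Int)) (p : Int × Int) :
    (cpDirs.map (fun d => (p.1 + d.1, p.2 + d.2))).filter (fun q => points.contains q)
      = [(p.1 - 1, p.2), (p.1 + 1, p.2), (p.1, p.2 - 1), (p.1, p.2 + 1)].filter
          (fun q => PySem.Set.contains (PySem.Set.ofList points) q) := by
  have h : cpDirs.map (fun d => (p.1 + d.1, p.2 + d.2))
      = [(p.1 - 1, p.2), (p.1 + 1, p.2), (p.1, p.2 - 1), (p.1, p.2 + 1)] := by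
    simp [cpDirs]; omega
  rw [h]
  congr 1
  funext q
  exact (contains_ofList_eq points q).symm

-- bisimulation of the two inner loops: A's queue is the not-yet-popped suffix of B's,
-- and A's counter runs one ahead of B's (total_flood = size + 1).
lemma loop_eq (points : List (Int × Int)) (f : Nat) :
    ∀ (v : PySem.Set (Int × Int)) (qa qb : List (Int × Int)) (head : Nat) (k : Int),
      qb.drop head = qa →
      cpLoopA points f v qa (k + 1) = cpLoopB (PySem.Set.ofList points) f v qb head k := by
  induction f with
  | zero => intro v qa qb head k _; rfl
  | succ f ih =>
    intro v qa qb head k hdrop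
    match hqa : qa with
    | [] =>
      have hlen : qb.length ≤ head := by
        by_contra h
        rw [Nat.not_le] at h
        have := List.drop_eq_getElem_cons h
        rw [hdrop] at this
        simp at this
        omega
      simp [cpLoopA, cpLoopB, Nat.not_lt.mpr hlen]
    | p :: rest =>
      have hlt : head < qb.length := by
        by_contra h
        rw [Nat.not_lt] at h
        rw [List.drop_eq_nil_of_le h] at hdrop
        simp at hdrop
      have hcons := List.drop_eq_getElem_cons hlt
      rw [hdrop] at hcons
      have hp : qb[head] = p := by
        have := congrArg List.head? hcons
        simpa [List.getElem?_eq_getElem hlt] using this.symm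
      have hrest : qb.drop (head + 1) = rest := by
        have := congrArg List.tail hcons
        simpa using this.symm
      rw [cpLoopA, cpLoopB]
      simp only [dif_pos hlt, hp]
      by_cases hv : PySem.Set.contains v p
      · simp only [if_pos hv]
        exact ih v rest qb (head + 1) k hrest
      · simp only [if_neg hv]
        have hcond : (k + 1 + 1 > 20) ↔ (k + 1 ≥ 20) := by omega
        by_cases h20 : k + 1 + 1 > 20
        · rw [if_pos h20, if_pos (hcond.mp h20)]
        · rw [if_neg h20, if_neg (fun hh => h20 (hcond.mpr hh))]
          rw [nbrs_eq points p]
          have hdrop' : (qb ++ ([(p.1 - 1, p.2), (p.1 + 1, p.2), (p.1, p.2 - 1), (p.1, p.2 + 1)].filter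
              (fun q => PySem.Set.contains (PySem.Set.ofList points) q))).drop (head + 1)
              = rest ++ ([(p.1 - 1, p.2), (p.1 + 1, p.2), (p.1, p.2 - 1), (p.1, p.2 + 1)].filter
              (fun q => PySem.Set.contains (PySem.Set.ofList points) q)) := by
            rw [List.drop_append_of_le_length hlt, hrest]
          exact ih (PySem.Set.add v p) _ _ (head + 1) (k + 1) hdrop'

-- the outer loops agree step for step
lemma outer_eq (points : List (Int × Int)) :
    ∀ (rem : List (Int × Int)) (v : PySem.Set (Int × Int)),
      cpOuterA points rem v = cpOuterB points (PySem.Set.ofList points) rem v := by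
  intro rem
  induction rem with
  | nil => intro v; rfl
  | cons p ps ih =>
    intro v
    rw [cpOuterA, cpOuterB]
    by_cases hv : PySem.Set.contains v p
    · simp only [if_pos hv]; exact ih v
    · simp only [if_neg hv]
      have h := loop_eq points (4 * points.length + 2) v [p] [p] 0 0 rfl
      rw [show (0 : Int) + 1 = 1 by omega] at h
      rw [← h]
      cases cpLoopA points (4 * points.length + 2) v [p] 1 with
      | none => rfl
      | some s => exact ih s

-- ===== VERDICT (by name: the statement is the Claim_ definition above) =====
theorem check_points_spec : Claim_equal_check_points := by
  intro points _
  unfold Spec_check_points check_points check_points_alt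
  exact outer_eq points points PySem.Set.empty
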